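-- pv_equiv track=rewrite | github.com/AlunStokes/collatz | src/sympy_test.py | get_const
-- ===== SOURCE A (Python) =====
-- def get_const(b):
--     m = 0
--     A = []
--     for j, i in enumerate(b[1:]):
--         if i == '1':
--             #Extra for skipping first index, second extra for 1-indexing
--             A.append(j + 2)
--     i = 0
--     while i < len(A):
--         m += 3**(i)*2**(len(b)-A[i])
--         i += 1
--     if b[0] == '1':
--         m -= 2**(len(b) - 1)
--     return m
-- ===== SOURCE B (Python) =====
-- def get_const(b):
--     # One right-to-left Horner-style pass in base 3; no intermediate list.
--     m = 0
--     pow2 = 1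
--     for c in reversed(b[1:]):
--         if c == '1':
--             m = 3 * m + pow2
--         pow2 *= 2
--     if b[0] == '1':
--         m -= pow2
--     return m
-- ===== Notes on version B (the rewrite author's own statement) =====
-- stated objective: alternative
-- what changed: B replaces A's two passes (building the list of 1-bit positions, then summing 3**i * 2**(len(b)-pos) with explicit exponentiations) by a single right-to-left Horner-style pass in base 3 that carries the running total and a doubling power of 2, with no intermediate list.
import Mathlib
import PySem

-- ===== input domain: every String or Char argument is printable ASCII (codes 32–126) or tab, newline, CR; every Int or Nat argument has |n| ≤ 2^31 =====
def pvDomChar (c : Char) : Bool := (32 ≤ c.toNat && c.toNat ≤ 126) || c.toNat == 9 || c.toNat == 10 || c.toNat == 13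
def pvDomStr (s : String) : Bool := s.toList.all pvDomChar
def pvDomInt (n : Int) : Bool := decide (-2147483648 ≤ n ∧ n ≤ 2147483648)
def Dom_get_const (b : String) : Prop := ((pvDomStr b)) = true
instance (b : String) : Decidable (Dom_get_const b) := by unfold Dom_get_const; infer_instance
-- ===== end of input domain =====

-- B is a single right-to-left Horner pass; A builds a position list and sums with explicit powers.

-- ===== PORT A =====
-- for j, i in enumerate(b[1:]): if i == '1': A.append(j + 2)
def pvStepA (acc : List Nat) (p : Char × Nat) : List Nat :=
  if p.1 == '1' then acc ++ [p.2 + 2] else acc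

def get_const (b : String) : Int :=
  let l := b.toList
  let n := l.length
  -- b[1:] is exactly drop 1; enumerate = zipIdx (value, index)
  let A := ((l.drop 1).zipIdx.foldl pvStepA ([] : List Nat))
  -- while i < len(A): m += 3**i * 2**(len(b) - A[i]); i += 1
  -- (the exponent len(b) - A[i] is never negative, so Nat subtraction is exact)
  let m := A.zipIdx.foldl (fun m p => m + (3 : Int) ^ p.2 * (2 : Int) ^ (n - p.1)) 0
  if l.head? == some '1' then m - 2 ^ (n - 1) else m

-- ===== PORT B =====
-- for c in reversed(b[1:]): if c == '1': m = 3*m + pow2; pow2 *= 2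
def pvStepB (s : Int × Int) (c : Char) : Int × Int :=
  ((if c == '1' then 3 * s.1 + s.2 else s.1), 2 * s.2)

def get_const_alt (b : String) : Int :=
  let s := ((b.toList.drop 1).reverse).foldl pvStepB (0, 1)
  if b.toList.head? == some '1' then s.1 - s.2 else s.1

-- ===== PRECONDITION & SPEC =====
-- Pre_ excludes only the empty string, on which both A and B raise IndexError at b[0].
def Pre_get_const (b : String) : Prop := b.toList ≠ []
instance (b : String) : Decidable (Pre_get_const b) := by unfold Pre_get_const; infer_instance
def pvWitness_get_const : String := "101"

def Spec_get_const (b : String) (out : Int) : Prop := out = get_const_alt b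
instance (b : String) (out : Int) : Decidable (Spec_get_const b out) := by unfold Spec_get_const; infer_instance

-- ===== CLAIM (what is proved, stated in full; the proofs are below) =====
def Claim_equal_get_const : Prop := ∀ (b : String), Dom_get_const b → Pre_get_const b → Spec_get_const b (get_const b)

-- ===== LEMMAS AND PROOFS =====

-- the list of 1-bit positions (offset by 2, as in A), indices starting at k
def pvOnes : List Char → Nat → List Nat
  | [], _ => []
  | c :: t, k => if c == '1' then (k + 2) :: pvOnes t (k + 1) else pvOnes t (k + 1)

theorem pvFoldA_eq (t : List Char) : ∀ (k : Nat) (acc : List Nat),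
    (t.zipIdx k).foldl pvStepA acc = acc ++ pvOnes t k := by
  induction t with
  | nil => intro k acc; simp [pvOnes]
  | cons c t ih =>
    intro k acc
    simp only [List.zipIdx_cons, List.foldl_cons, pvOnes, pvStepA]
    by_cases hc : c == '1' <;> simp [hc, ih]

-- the inner-loop sum with rank starting at r
def pvSumA (n : Nat) : List Nat → Nat → Int
  | [], _ => 0
  | a :: A, r => (3 : Int) ^ r * (2 : Int) ^ (n - a) + pvSumA n A (r + 1)

theorem pvFoldSum_eq (n : Nat) (A : List Nat) : ∀ (r : Nat) (m : Int),
    (A.zipIdx r).foldl (fun m p => m + (3 : Int) ^ p.2 * (2 : Int) ^ (n - p.1)) m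
      = m + pvSumA n A r := by
  induction A with
  | nil => intro r m; simp [pvSumA]
  | cons a A ih =>
    intro r m
    simp only [List.zipIdx_cons, List.foldl_cons, pvSumA, ih]
    ring

theorem pvSumA_succ (n : Nat) (A : List Nat) : ∀ r, pvSumA n A (r + 1) = 3 * pvSumA n A r := by
  induction A with
  | nil => intro r; simp [pvSumA]
  | cons a A ih =>
    intro r
    simp only [pvSumA, ih]
    ring

theorem pvMain (t : List Char) : ∀ (k n : Nat), n = k + t.length + 1 →
    t.foldr (fun c s => pvStepB s c) ((0 : Int), (1 : Int))
      = (pvSumA n (pvOnes t k) 0, (2 : Int) ^ t.length) := by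
  induction t with
  | nil => intro k n _; simp [pvSumA, pvOnes]
  | cons c t ih =>
    intro k n hn
    have hn' : n = (k + 1) + t.length + 1 := by
      simp only [List.length_cons] at hn; omega
    have hexp : n - (k + 2) = t.length := by omega
    rw [List.foldr_cons, ih (k + 1) n hn']
    by_cases hc : c == '1'
    · simp only [pvStepB, pvOnes, hc, if_true, pvSumA, pvSumA_succ, hexp,
        List.length_cons, Prod.mk.injEq]
      exact ⟨by ring, by ring⟩
    · simp only [pvStepB, pvOnes, List.length_cons, Prod.mk.injEq,
        if_neg hc]
      exact ⟨trivial, by ring⟩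

-- ===== VERDICT (by name: the statement is the Claim_ definition above) =====
theorem get_const_spec : Claim_equal_get_const := by
  intro b _ hl
  have hl' : b.toList ≠ [] := hl
  have hlen : b.toList.length = (b.toList.drop 1).length + 1 := by
    cases hcl : b.toList with
    | nil => exact absurd hcl hl'
    | cons c l => simp
  have hmain := pvMain (b.toList.drop 1) 0 b.toList.length (by omega)
  have hpow : b.toList.length - 1 = (b.toList.drop 1).length := by omega
  simp only [Spec_get_const, get_const, get_const_alt, List.foldl_reverse,
    pvFoldA_eq, List.nil_append, pvFoldSum_eq, zero_add, hmain, hpow]
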